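-- pv_equiv track=rewrite | github.com/abhishek0901/-2-1-texas-hodem-cfr-implementation | Poker.py | parse_history
-- ===== SOURCE A (Python) =====
-- def parse_history(h):
--     if len(h)==0:
--         return ("","","","")
--     elif len(h)<5:
--         return (h,"","","")
--     elif len(h)<9:
--         return (h[0:4],h[4:],"","")
--     h1 = h[0:4]
--     h2 = h[4:8]
--     preflop = ""
--     flop = ""
--     round = "preflop"
--     actions = ["CC","BB","FF"]
--     for i in range(8,len(h),2):
--         if h[i:i+2] in actions:
--             if round == "preflop":
--                 preflop += h[i:i+2]
--             elif round == "flop":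
--                 flop += h[i:i+2]
--         else:
--             h1 += h[i:i+2]
--             h2 += h[i:i+2]
--             round = "flop"
--     return (h1,h2,preflop,flop)
-- ===== SOURCE B (Python) =====
-- def parse_history(h):
--     if len(h) == 0:
--         return ("", "", "", "")
--     if len(h) < 5:
--         return (h, "", "", "")
--     if len(h) < 9:
--         return (h[0:4], h[4:], "", "")
--     actions = ("CC", "BB", "FF")
--     chunks = [h[i:i+2] for i in range(8, len(h), 2)]
--     first_card = next((j for j, c in enumerate(chunks) if c not in actions), len(chunks))
--     cards = "".join(c for c in chunks if c not in actions)
--     return (h[0:4] + cards,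
--             h[4:8] + cards,
--             "".join(chunks[:first_card]),
--             "".join(c for c in chunks[first_card:] if c in actions))
-- ===== Notes on version B (the rewrite author's own statement) =====
-- stated objective: alternative
-- what changed: Replaces A's single stateful pass with a round flag by a chunk-list decomposition: build the 2-char chunks once, locate the index of the first card chunk, and obtain each output field by an independent take/drop/filter over the chunk list.
import Mathlib
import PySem

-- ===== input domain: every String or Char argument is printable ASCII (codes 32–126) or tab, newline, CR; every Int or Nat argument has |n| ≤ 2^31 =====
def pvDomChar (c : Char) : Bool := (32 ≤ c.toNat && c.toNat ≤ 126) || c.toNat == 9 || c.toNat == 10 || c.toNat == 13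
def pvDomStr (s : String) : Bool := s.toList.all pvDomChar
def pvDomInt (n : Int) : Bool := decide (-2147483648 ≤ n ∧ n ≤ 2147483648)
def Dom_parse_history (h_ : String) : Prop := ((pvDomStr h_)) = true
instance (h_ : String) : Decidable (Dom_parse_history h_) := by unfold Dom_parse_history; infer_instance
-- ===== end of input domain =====

-- B replaces A's single stateful pass (round flag) by a chunk-list decomposition
-- (find the first card chunk, then independent take/drop/filter passes): 'alternative', same cost.

-- ===== PORT A =====
-- actions = ["CC","BB","FF"]
def phActions : List (List Char) := [['C','C'], ['B','B'], ['F','F']]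

-- the body of A's for-loop, over the current state and the chunk h[i:i+2]
def phStep (st : List Char × List Char × List Char × List Char × String) (ch : List Char) :
    List Char × List Char × List Char × List Char × String :=
  let (h1, h2, pf, fl, round) := st
  if phActions.contains ch then
    if round = "preflop" then (h1, h2, pf ++ ch, fl, round)
    else if round = "flop" then (h1, h2, pf, fl ++ ch, round)
    else (h1, h2, pf, fl, round)
  else (h1 ++ ch, h2 ++ ch, pf, fl, "flop")

def parse_history (h_ : String) : String × String × String × String :=
  let s := h_.toList
  if s.length = 0 then ("", "", "", "")
  else if s.length < 5 then (h_, "", "", "")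
  else if s.length < 9 then
    (String.ofList (PySem.List.slice s (some 0) (some 4)),
     String.ofList (PySem.List.slice s (some 4) none), "", "")
  else
    let st := (PySem.List.pyRange 8 (s.length : Int) 2).foldl
      (fun st i => phStep st (PySem.List.slice s (some i) (some (i + 2))))
      (PySem.List.slice s (some 0) (some 4), PySem.List.slice s (some 4) (some 8),
       [], [], "preflop")
    (String.ofList st.1, String.ofList st.2.1, String.ofList st.2.2.1, String.ofList st.2.2.2.1)

-- ===== PORT B =====
def parse_history_alt (h_ : String) : String × String × String × String :=
  let s := h_.toList
  if s.length = 0 then ("", "", "", "")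
  else if s.length < 5 then (h_, "", "", "")
  else if s.length < 9 then
    (String.ofList (PySem.List.slice s (some 0) (some 4)),
     String.ofList (PySem.List.slice s (some 4) none), "", "")
  else
    let chunks := (PySem.List.pyRange 8 (s.length : Int) 2).map
      (fun i => PySem.List.slice s (some i) (some (i + 2)))
    -- next((j for j,c in enumerate(chunks) if c not in actions), len(chunks)) = findIdx
    let firstCard := chunks.findIdx (fun c => !phActions.contains c)
    let cards := (chunks.filter (fun c => !phActions.contains c)).flatten
    (String.ofList (PySem.List.slice s (some 0) (some 4) ++ cards),
     String.ofList (PySem.List.slice s (some 4) (some 8) ++ cards),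
     String.ofList (PySem.List.slice chunks none (some (firstCard : Int))).flatten,
     String.ofList ((PySem.List.slice chunks (some (firstCard : Int)) none).filter
       (fun c => phActions.contains c)).flatten)

-- ===== PRECONDITION & SPEC =====
def Spec_parse_history (h_ : String) (out : String × String × String × String) : Prop := out = parse_history_alt h_
instance (h_ : String) (out : String × String × String × String) : Decidable (Spec_parse_history h_ out) := by unfold Spec_parse_history; infer_instance

-- ===== CLAIM (what is proved, stated in full; the proofs are below) =====
def Claim_equal_parse_history : Prop := ∀ (h_ : String), Dom_parse_history h_ → Spec_parse_history h_ (parse_history h_)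

-- ===== LEMMAS AND PROOFS =====

-- A's loop once the round flag is "flop": cards go to h1/h2, actions go to flop.
theorem phStep_flop (cs : List (List Char)) : ∀ (h1 h2 pf fl : List Char),
    cs.foldl phStep (h1, h2, pf, fl, "flop") =
      (h1 ++ (cs.filter (fun c => !phActions.contains c)).flatten,
       h2 ++ (cs.filter (fun c => !phActions.contains c)).flatten,
       pf,
       fl ++ (cs.filter (fun c => phActions.contains c)).flatten,
       "flop") := by
  induction cs with
  | nil => intro h1 h2 pf fl; simp
  | cons c cs ih =>
    intro h1 h2 pf fl
    by_cases hc : c ∈ phActions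
    · simp [List.foldl_cons, phStep, hc, ih, List.append_assoc]
    · simp [List.foldl_cons, phStep, hc, ih, List.append_assoc]

-- A's loop from the initial "preflop" state: preflop collects the leading run of
-- actions, flop the actions after the first card, h1/h2 all cards.
theorem phStep_preflop (cs : List (List Char)) : ∀ (h1 h2 pf fl : List Char), ∃ r,
    cs.foldl phStep (h1, h2, pf, fl, "preflop") =
      (h1 ++ (cs.filter (fun c => !phActions.contains c)).flatten,
       h2 ++ (cs.filter (fun c => !phActions.contains c)).flatten,
       pf ++ (cs.takeWhile (fun c => phActions.contains c)).flatten,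
       fl ++ ((cs.dropWhile (fun c => phActions.contains c)).filter
               (fun c => phActions.contains c)).flatten,
       r) := by
  induction cs with
  | nil => intro h1 h2 pf fl; exact ⟨"preflop", by simp⟩
  | cons c cs ih =>
    intro h1 h2 pf fl
    by_cases hc : c ∈ phActions
    · obtain ⟨r, hr⟩ := ih h1 h2 (pf ++ c) fl
      exact ⟨r, by simp [List.foldl_cons, phStep, hc, hr, List.append_assoc]⟩
    · refine ⟨"flop", ?_⟩
      simp [List.foldl_cons, phStep, hc, phStep_flop, List.append_assoc]

-- take up to the first failure of p = takeWhile p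
theorem take_findIdx_not {α : Type} (p : α → Bool) (cs : List α) :
    cs.take (cs.findIdx (fun c => !p c)) = cs.takeWhile p := by
  induction cs with
  | nil => rfl
  | cons c cs ih =>
    by_cases hc : p c = true
    · simp [List.findIdx_cons, hc, ih]
    · simp [List.findIdx_cons, hc]

theorem drop_findIdx_not {α : Type} (p : α → Bool) (cs : List α) :
    cs.drop (cs.findIdx (fun c => !p c)) = cs.dropWhile p := by
  induction cs with
  | nil => rfl
  | cons c cs ih =>
    by_cases hc : p c = true
    · simp [List.findIdx_cons, hc, ih]
    · simp [List.findIdx_cons, hc]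

-- ===== VERDICT (by name: the statement is the Claim_ definition above) =====
theorem parse_history_spec : Claim_equal_parse_history := by
  intro h_ _
  unfold Spec_parse_history parse_history parse_history_alt
  by_cases h0 : h_.toList.length = 0
  · simp only [if_pos h0]
  · by_cases h5 : h_.toList.length < 5
    · simp only [if_neg h0, if_pos h5]
    · by_cases h9 : h_.toList.length < 9
      · simp only [if_neg h0, if_neg h5, if_pos h9]
      · simp only [if_neg h0, if_neg h5, if_neg h9]
        rw [← List.foldl_map]
        set cs := (PySem.List.pyRange 8 ((h_.toList.length : Int)) 2).map
          (fun i => PySem.List.slice h_.toList (some i) (some (i + 2))) with hcs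
        obtain ⟨r, hr⟩ := phStep_preflop cs
          (PySem.List.slice h_.toList (some 0) (some 4))
          (PySem.List.slice h_.toList (some 4) (some 8)) [] []
        rw [hr]
        rw [show PySem.List.slice cs none ((((cs.findIdx fun c => !phActions.contains c) : Int)) : Option Int)
              = cs.take (cs.findIdx fun c => !phActions.contains c)
            from PySem.List.slice_to_natCast cs _,
            show PySem.List.slice cs ((((cs.findIdx fun c => !phActions.contains c) : Int)) : Option Int) none
              = cs.drop (cs.findIdx fun c => !phActions.contains c)
            from PySem.List.slice_from_natCast cs _]
        rw [take_findIdx_not (fun c => phActions.contains c) cs,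
            drop_findIdx_not (fun c => phActions.contains c) cs]
        simp only [List.nil_append]
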